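-- pv_equiv track=rewrite | github.com/sowmith12/RISC-V-Static-Instruction-Scheduler-Compiler- | codes/compiler.py | compute_earliest_times
-- ===== SOURCE A (Python) =====
-- from collections import deque, namedtuple
--
-- def compute_earliest_times(preds, succs, edge_lat, n):
--     e = [0] * n
--     in_deg = [len(preds[i]) for i in range(n)]
--     ready = deque(i for i in range(n) if in_deg[i] == 0)
--     while ready:
--         i = ready.popleft()
--         for succ in succs[i]:
--             lat = edge_lat.get((i, succ), 1)
--             e[succ] = max(e[succ], e[i] + lat)
--             in_deg[succ] -= 1
--             if in_deg[succ] == 0: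
--                 ready.append(succ)
--     return e
-- ===== SOURCE B (Python) =====
-- def compute_earliest_times(preds, succs, edge_lat, n):
--     # Iterative relaxation to a fixpoint: repeatedly raise e[j] to e[p]+lat for
--     # each dependence edge p->j until a whole pass changes nothing (at most n
--     # passes are needed on an acyclic dependence graph, whatever the node order).
--     e = [0] * n
--     for _ in range(n):
--         changed = False
--         for j in range(n):
--             for p in preds[j]:
--                 t = e[p] + edge_lat.get((p, j), 1)
--                 if t > e[j]:
--                     e[j] = t
--                     changed = True
--         if not changed:
--             break
--     return e
-- ===== Notes on version B (the rewrite author's own statement) =====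
-- stated objective: alternative
-- what changed: Replaces Kahn's ready-queue/in-degree forward propagation through succs with iterative relaxation to a fixpoint over the preds lists (repeat up to n passes raising e[j] to e[p]+lat, stop when a pass changes nothing), dropping the deque, the in-degree array and succs entirely.
-- outside the precondition, e.g. on compute_earliest_times({0: [1], 1: [0]}, {0: [1], 1: [0]}, {}, 2): A returns [0, 0], B returns [3, 4]; on compute_earliest_times({0: [], 1: []}, {0: [1], 1: []}, {}, 2): A returns [0, 1], B returns [0, 0]; on compute_earliest_times({0: [], 1: []}, {0: [-1], 1: []}, {}, 2): A returns [0, 1], B returns [0, 0]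
import Mathlib
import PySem

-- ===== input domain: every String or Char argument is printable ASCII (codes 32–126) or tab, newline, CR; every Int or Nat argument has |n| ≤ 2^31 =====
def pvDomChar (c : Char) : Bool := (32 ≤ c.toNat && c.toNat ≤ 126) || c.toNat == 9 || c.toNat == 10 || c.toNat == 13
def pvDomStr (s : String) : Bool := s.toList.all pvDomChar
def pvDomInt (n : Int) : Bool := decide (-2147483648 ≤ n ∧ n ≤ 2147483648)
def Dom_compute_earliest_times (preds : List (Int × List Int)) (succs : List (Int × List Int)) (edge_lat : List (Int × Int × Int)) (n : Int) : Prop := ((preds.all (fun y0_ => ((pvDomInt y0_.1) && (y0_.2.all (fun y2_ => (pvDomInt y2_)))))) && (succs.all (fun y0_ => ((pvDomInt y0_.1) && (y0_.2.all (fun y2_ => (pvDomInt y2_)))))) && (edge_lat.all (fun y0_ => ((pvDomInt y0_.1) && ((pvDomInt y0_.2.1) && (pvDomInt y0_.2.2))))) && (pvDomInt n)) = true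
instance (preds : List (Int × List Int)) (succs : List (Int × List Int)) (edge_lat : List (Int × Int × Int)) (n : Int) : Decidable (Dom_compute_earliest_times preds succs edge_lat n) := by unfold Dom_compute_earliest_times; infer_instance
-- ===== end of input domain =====

-- B replaces Kahn's ready-queue/in-degree propagation through succs with iterative
-- relaxation over the preds lists to a fixpoint (alternative algorithm; succs unused).

-- dict[k] lookup on the association list (first match); default [] is only taken
-- where Python would raise KeyError, which Pre_ excludes.
def pvDictGet (d : List (Int × List Int)) (k : Int) : List Int :=
  ((d.find? (fun kv => kv.1 == k)).map Prod.snd).getD []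

-- edge_lat.get((p, j), 1) : first-match lookup with default 1 (Python dict.get).
def pvLatGet (el : List (Int × Int × Int)) (p j : Int) : Int :=
  ((el.find? (fun t => t.1 == p && t.2.1 == j)).map (fun t => t.2.2)).getD 1

-- ===== PORT A =====
-- body of 'for succ in succs[i]': state is (e, in_deg, tail of ready).
-- pyGetD/pySetD defaults are only taken where Python would raise IndexError (excluded by Pre_).
def ceInner (edge_lat : List (Int × Int × Int)) (i : Int) (L : List Int)
    (st : List Int × List Int × List Int) : List Int × List Int × List Int :=
  L.foldl (fun st succ =>
    let lat := pvLatGet edge_lat i succ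
    let e' := PySem.List.pySetD st.1 succ (max (PySem.List.pyGetD st.1 succ 0) (PySem.List.pyGetD st.1 i 0 + lat))
    let d' := PySem.List.pySetD st.2.1 succ (PySem.List.pyGetD st.2.1 succ 0 - 1)
    let r' := if PySem.List.pyGetD d' succ 0 = 0 then st.2.2 ++ [succ] else st.2.2
    (e', d', r')) st

-- the while loop; fuel bounds the number of pops (each node enters ready at most
-- once, so n pops suffice under Pre_; fuel exhaustion is unreachable there).
def ceLoop (succs : List (Int × List Int)) (edge_lat : List (Int × Int × Int)) :
    Nat → List Int → List Int → List Int → List Int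
  | _, e, _, [] => e
  | 0, e, _, _ :: _ => e
  | fuel + 1, e, indeg, i :: rest =>
      let st := ceInner edge_lat i (pvDictGet succs i) (e, indeg, rest)
      ceLoop succs edge_lat fuel st.1 st.2.1 st.2.2

def compute_earliest_times (preds : List (Int × List Int)) (succs : List (Int × List Int)) (edge_lat : List (Int × Int × Int)) (n : Int) : List Int :=
  let e := List.replicate n.toNat 0
  let in_deg := (PySem.List.pyRange 0 n 1).map (fun i => PySem.List.len (pvDictGet preds i))
  let ready := (PySem.List.pyRange 0 n 1).filter (fun i => PySem.List.pyGetD in_deg i 0 == 0)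
  ceLoop succs edge_lat n.toNat e in_deg ready

-- ===== PORT B =====
-- body of 'for p in preds[j]': state is (e, changed).
def bfNode (el : List (Int × Int × Int)) (j : Int) (ps : List Int)
    (st : List Int × Bool) : List Int × Bool :=
  ps.foldl (fun st p =>
    let t := PySem.List.pyGetD st.1 p 0 + pvLatGet el p j
    if PySem.List.pyGetD st.1 j 0 < t then (PySem.List.pySetD st.1 j t, true) else st) st

-- one pass 'for j in range(n)' starting with changed = False.
def bfRound (preds : List (Int × List Int)) (el : List (Int × Int × Int)) (n : Int)
    (e : List Int) : List Int × Bool :=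
  (PySem.List.pyRange 0 n 1).foldl (fun st j => bfNode el j (pvDictGet preds j) st) (e, false)

-- 'for _ in range(n): ...; if not changed: break'.
def bfLoop (preds : List (Int × List Int)) (el : List (Int × Int × Int)) (n : Int) :
    Nat → List Int → List Int
  | 0, e => e
  | m + 1, e =>
      let st := bfRound preds el n e
      if st.2 then bfLoop preds el n m st.1 else st.1

def compute_earliest_times_alt (preds : List (Int × List Int)) (succs : List (Int × List Int)) (edge_lat : List (Int × Int × Int)) (n : Int) : List Int :=
  bfLoop preds edge_lat n n.toNat (List.replicate n.toNat 0)

-- ===== PRECONDITION & SPEC =====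
-- one step of the well-founded closure: the nodes all of whose preds are already in S.
def pvSstep (preds : List (Int × List Int)) (n : Int) (S : List Int) : List Int :=
  (PySem.List.pyRange 0 n 1).filter (fun j => (pvDictGet preds j).all (fun p => S.contains p))

def pvSiter (preds : List (Int × List Int)) (n : Int) : Nat → List Int
  | 0 => []
  | k + 1 => pvSstep preds n (pvSiter preds n k)

-- Pre_ admits exactly the well-formed dependence DAGs, whatever order the node indices
-- come in: every node 0..n-1 is a key of preds and succs (else A raises KeyError), all
-- listed neighbours are node indices in [0, n) (else A raises IndexError or silently
-- wraps a negative index), preds and succs list the same edge multiset (they are two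
-- views of one edge set by the data structure's contract), and the graph is acyclic
-- (within n closure steps every node is reached from the sources).  Excluded inputs on
-- which A still returns a value are the cyclic or preds/succs-mismatched graphs, where
-- A's partial Kahn propagation stops at an accidental point, the negative-index
-- wraparound cases, and association lists with a duplicated dict key (a Python dict
-- cannot carry one: first-match and last-wins readings disagree).
-- the conjunct n <= preds.length is implied (the n distinct keys 0..n-1 are entries of
-- preds) and only lets the check short-circuit on huge n before building the range.
def pvPreB (preds : List (Int × List Int)) (succs : List (Int × List Int)) (edge_lat : List (Int × Int × Int)) (n : Int) : Bool :=
  decide (n ≤ (preds.length : Int)) &&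
  (PySem.List.pyRange 0 n 1).all (fun j =>
    preds.any (fun kv => kv.1 == j) &&
    succs.any (fun kv => kv.1 == j) &&
    (pvDictGet preds j).all (fun p => decide (0 ≤ p) && decide (p < n)) &&
    (pvDictGet succs j).all (fun s => decide (0 ≤ s) && decide (s < n)) &&
    (PySem.List.pyRange 0 n 1).all (fun i =>
      (pvDictGet succs i).count j == (pvDictGet preds j).count i) &&
    (pvSiter preds n n.toNat).contains j)

def Pre_compute_earliest_times (preds : List (Int × List Int)) (succs : List (Int × List Int)) (edge_lat : List (Int × Int × Int)) (n : Int) : Prop :=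
  pvPreB preds succs edge_lat n = true ∧ (preds.map Prod.fst).Nodup ∧
    (succs.map Prod.fst).Nodup ∧ (edge_lat.map (fun t => (t.1, t.2.1))).Nodup
instance (preds : List (Int × List Int)) (succs : List (Int × List Int)) (edge_lat : List (Int × Int × Int)) (n : Int) : Decidable (Pre_compute_earliest_times preds succs edge_lat n) := by unfold Pre_compute_earliest_times; infer_instance

-- a DAG whose indices are NOT topologically ordered (edges 2->0->1).
def pvWitness_compute_earliest_times : (List (Int × List Int)) × (List (Int × List Int)) × (List (Int × Int × Int)) × Int :=
  ([(0, [2]), (1, [0]), (2, [])], [(0, [1]), (1, []), (2, [0])], [(2, 0, 2), (0, 1, 3)], 3)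

def Spec_compute_earliest_times (preds : List (Int × List Int)) (succs : List (Int × List Int)) (edge_lat : List (Int × Int × Int)) (n : Int) (out : List Int) : Prop := out = compute_earliest_times_alt preds succs edge_lat n
instance (preds : List (Int × List Int)) (succs : List (Int × List Int)) (edge_lat : List (Int × Int × Int)) (n : Int) (out : List Int) : Decidable (Spec_compute_earliest_times preds succs edge_lat n out) := by unfold Spec_compute_earliest_times; infer_instance

-- ===== CLAIM (what is proved, stated in full; the proofs are below) =====
def Claim_equal_compute_earliest_times : Prop := ∀ (preds : List (Int × List Int)) (succs : List (Int × List Int)) (edge_lat : List (Int × Int × Int)) (n : Int), Dom_compute_earliest_times preds succs edge_lat n → Pre_compute_earliest_times preds succs edge_lat n → Spec_compute_earliest_times preds succs edge_lat n (compute_earliest_times preds succs edge_lat n)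

-- ===== LEMMAS AND PROOFS =====

def pvGI (xs : List Int) (i : Int) : Int := PySem.List.pyGetD xs i 0

-- the recurrence both programs compute: max(0, max over p in preds[j] of V[p] + lat(p,j)).
def pvRec (preds : List (Int × List Int)) (el : List (Int × Int × Int)) (V : List Int) (j : Int) : Int :=
  (pvDictGet preds j).foldl (fun b p => max b (pvGI V p + pvLatGet el p j)) 0

-- the reference solution: Jacobi iteration of the recurrence, n rounds.
def pvEi (preds : List (Int × List Int)) (el : List (Int × Int × Int)) (n : Int) : Nat → List Int
  | 0 => List.replicate n.toNat 0
  | k + 1 => (PySem.List.pyRange 0 n 1).map (fun j => pvRec preds el (pvEi preds el n k) j)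

def pvE (preds : List (Int × List Int)) (el : List (Int × Int × Int)) (n : Int) : List Int :=
  pvEi preds el n n.toNat

lemma pvGI_eq_getD (xs : List Int) (j : Int) (hj : 0 ≤ j) :
    pvGI xs j = xs.getD j.toNat 0 := by
  unfold pvGI
  have h : j = ((j.toNat : Nat) : Int) := by omega
  conv_lhs => rw [h]
  exact PySem.List.pyGetD_natCast xs j.toNat 0

lemma pvGI_set (xs : List Int) (i j v : Int) (hi0 : 0 ≤ i) (hil : i < (xs.length : Int))
    (hj0 : 0 ≤ j) :
    pvGI (PySem.List.pySetD xs i v) j = if j = i then v else pvGI xs j := by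
  rw [PySem.List.pySetD_of_nonneg xs v hi0, pvGI_eq_getD _ _ hj0, pvGI_eq_getD _ _ hj0]
  by_cases h : j = i
  · subst h
    rw [if_pos rfl, List.getD, List.getElem?_set, if_pos rfl, if_pos (by omega)]
    rfl
  · rw [if_neg h, List.getD, List.getD, List.getElem?_set,
      if_neg (show ¬ i.toNat = j.toNat by omega)]

lemma pvFoldlMax_init (f : Int → Int) (l : List Int) (a c : Int) :
    l.foldl (fun b p => max b (f p)) (max a c) = max (l.foldl (fun b p => max b (f p)) a) c := by
  induction l generalizing a with
  | nil => rfl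
  | cons x l ih => simp only [List.foldl_cons]; rw [max_right_comm, ih]

lemma pvFoldlMax_ge_init (f : Int → Int) (l : List Int) (a : Int) :
    a ≤ l.foldl (fun b p => max b (f p)) a := by
  induction l generalizing a with
  | nil => exact le_refl _
  | cons x l ih => exact le_trans (le_max_left a (f x)) (ih _)

lemma pvFoldlMax_mono_init (f : Int → Int) (l : List Int) (a a' : Int) (h : a ≤ a') :
    l.foldl (fun b p => max b (f p)) a ≤ l.foldl (fun b p => max b (f p)) a' := by
  induction l generalizing a a' with
  | nil => exact h
  | cons x l ih => exact ih _ _ (max_le_max_right _ h)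

lemma pvFoldlMax_le (f : Int → Int) (l : List Int) (a c : Int)
    (ha : a ≤ c) (hl : ∀ x ∈ l, f x ≤ c) :
    l.foldl (fun b p => max b (f p)) a ≤ c := by
  induction l generalizing a with
  | nil => exact ha
  | cons x l ih =>
    exact ih _ (max_le ha (hl x List.mem_cons_self)) (fun y hy => hl y (List.mem_cons_of_mem _ hy))

lemma pvFoldlMax_mem_le (f : Int → Int) (l : List Int) :
    ∀ (a x : Int), x ∈ l → f x ≤ l.foldl (fun b p => max b (f p)) a := by
  induction l with
  | nil => intro a x hx; simp at hx
  | cons y l ih =>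
    intro a x hx
    rcases List.mem_cons.mp hx with h | h
    · subst h
      exact le_trans (le_max_right a (f x)) (pvFoldlMax_ge_init f l _)
    · exact ih _ x h

lemma pvFilter_insert_foldl (f : Int → Int) (l P : List Int) (i : Int) (hiP : i ∉ P) (a : Int) :
    (l.filter (fun p => decide (p ∈ P ++ [i]))).foldl (fun b p => max b (f p)) a
    = if i ∈ l then max ((l.filter (fun p => decide (p ∈ P))).foldl (fun b p => max b (f p)) a) (f i)
      else (l.filter (fun p => decide (p ∈ P))).foldl (fun b p => max b (f p)) a := by
  induction l generalizing a with
  | nil => simp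
  | cons x l ih =>
    rw [List.filter_cons, List.filter_cons]
    by_cases hx : x = i
    · subst hx
      have h1 : (decide (x ∈ P ++ [x])) = true := by simp
      have h2 : (decide (x ∈ P)) = false := by simpa using hiP
      rw [h1, h2]
      simp only [reduceIte]
      rw [List.foldl_cons, ih, pvFoldlMax_init]
      have hx2 : x ∈ x :: l := List.mem_cons_self
      rw [if_pos hx2]
      simp only [Bool.false_eq_true, reduceIte]
      by_cases hxl : x ∈ l
      · rw [if_pos hxl, max_assoc, max_self]
      · rw [if_neg hxl]
    · have hne : ¬ i = x := fun h => hx h.symm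
      simp only [List.mem_cons, hne, false_or]
      by_cases hxP : x ∈ P
      · have h1 : (decide (x ∈ P ++ [i])) = true := by simp [hxP]
        have h2 : (decide (x ∈ P)) = true := by simp [hxP]
        rw [h1, h2]
        simp only [reduceIte]
        rw [List.foldl_cons, List.foldl_cons, ih]
      · have h1 : (decide (x ∈ P ++ [i])) = false := by simp [hxP, hx]
        have h2 : (decide (x ∈ P)) = false := by simp [hxP]
        rw [h1, h2]
        simp only [Bool.false_eq_true, reduceIte]
        rw [ih]

lemma pvCount_le_countP (l P : List Int) (i : Int) (hiP : i ∉ P) :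
    l.count i ≤ l.countP (fun p => decide (p ∉ P)) := by
  rw [List.count]
  apply List.countP_mono_left
  intro a _ ha
  have : a = i := by simpa using ha
  subst this; simpa using hiP

lemma pvCountP_split (l P : List Int) (i : Int) (hiP : i ∉ P) :
    l.countP (fun p => decide (p ∉ P)) = l.countP (fun p => decide (p ∉ P ++ [i])) + l.count i := by
  induction l with
  | nil => simp
  | cons x l ih =>
    rw [List.countP_cons, List.countP_cons]
    by_cases hx : x = i
    · subst hx
      rw [if_pos (by simpa using hiP), if_neg (by simp), List.count_cons_self]
      omega
    · rw [List.count_cons_of_ne hx]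
      by_cases hxP : x ∈ P
      · rw [if_neg (by simp [hxP]), if_neg (by simp [hxP]), ih]
        omega
      · rw [if_pos (by simp [hxP]), if_pos (by simp [hxP, hx]), ih]
        omega

lemma pvNodup_length_le (l : List Int) (n : Int) (hnd : l.Nodup)
    (hb : ∀ x ∈ l, 0 ≤ x ∧ x < n) : l.length ≤ n.toNat := by
  have h1 : l.toFinset.card = l.length := List.toFinset_card_of_nodup hnd
  have h2 : l.toFinset ⊆ Finset.Ico 0 n := by
    intro x hx
    rw [List.mem_toFinset] at hx
    exact Finset.mem_Ico.mpr ⟨(hb x hx).1, (hb x hx).2⟩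
  have := Finset.card_le_card h2
  rw [h1, Int.card_Ico] at this
  omega

-- list-level equality from pointwise agreement on 0..n-1.
lemma pvExtEq (V W : List Int) (n : Int) (hV : V.length = n.toNat) (hW : W.length = n.toNat)
    (h : ∀ j : Int, 0 ≤ j → j < n → pvGI V j = pvGI W j) : V = W := by
  apply List.ext_getElem (by omega)
  intro k h1 h2
  have hk0 : (0:Int) ≤ (k:Int) := by positivity
  have hkn : (k:Int) < n := by omega
  have := h (k:Int) hk0 hkn
  rw [pvGI_eq_getD _ _ hk0, pvGI_eq_getD _ _ hk0] at this
  simp only [Int.toNat_natCast] at this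
  rw [List.getD_eq_getElem _ _ h1, List.getD_eq_getElem _ _ h2] at this
  exact this

-- ===== closure (acyclicity) lemmas =====

lemma pvSiter_mem_succ (preds : List (Int × List Int)) (n : Int) (k : Nat) (j : Int) :
    j ∈ pvSiter preds n (k+1) ↔
      (0 ≤ j ∧ j < n) ∧ ∀ p ∈ pvDictGet preds j, p ∈ pvSiter preds n k := by
  show j ∈ pvSstep preds n (pvSiter preds n k) ↔ _
  rw [pvSstep, List.mem_filter, PySem.List.mem_pyRange_one]
  simp [List.all_eq_true]

lemma pvS_induct (preds : List (Int × List Int)) (n : Int) (Q : Int → Prop)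
    (hc : ∀ j, (∀ p ∈ pvDictGet preds j, Q p) → Q j) :
    ∀ k j, j ∈ pvSiter preds n k → Q j := by
  intro k
  induction k with
  | zero => intro j hj; simp [pvSiter] at hj
  | succ k ih =>
    intro j hj
    obtain ⟨_, hall⟩ := (pvSiter_mem_succ preds n k j).mp hj
    exact hc j (fun p hp => ih p (hall p hp))

lemma pvS_no_self (preds : List (Int × List Int)) (n : Int) :
    ∀ k j, j ∈ pvSiter preds n k → j ∉ pvDictGet preds j := by
  intro k
  induction k with
  | zero => intro j hj; simp [pvSiter] at hj
  | succ k ih =>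
    intro j hj hmem
    obtain ⟨_, hall⟩ := (pvSiter_mem_succ preds n k j).mp hj
    exact ih j (hall j hmem) hmem

lemma pvSiter_bound (preds : List (Int × List Int)) (n : Int) (k : Nat) (j : Int)
    (hj : j ∈ pvSiter preds n k) : 0 ≤ j ∧ j < n := by
  cases k with
  | zero => simp [pvSiter] at hj
  | succ k => exact ((pvSiter_mem_succ preds n k j).mp hj).1

-- ===== the reference solution pvE =====

lemma pvEi_length (preds : List (Int × List Int)) (el : List (Int × Int × Int)) (n : Int) (k : Nat) :
    (pvEi preds el n k).length = n.toNat := by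
  cases k with
  | zero => exact List.length_replicate
  | succ k =>
    show ((PySem.List.pyRange 0 n 1).map _).length = _
    rw [List.length_map, PySem.List.length_pyRange_one]
    omega

lemma pvEi_succ_get (preds : List (Int × List Int)) (el : List (Int × Int × Int)) (n : Int)
    (k : Nat) (j : Int) (hj0 : 0 ≤ j) (hjn : j < n) :
    pvGI (pvEi preds el n (k+1)) j = pvRec preds el (pvEi preds el n k) j := by
  show PySem.List.pyGetD ((PySem.List.pyRange 0 n 1).map _) j 0 = _
  rw [PySem.List.pyGetD_map_pyRange_of_nonneg _ n j 0 hj0 hjn]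

lemma pvEi_stable (preds : List (Int × List Int)) (el : List (Int × Int × Int)) (n : Int) :
    ∀ k, ∀ j ∈ pvSiter preds n k, ∀ m, k ≤ m →
      pvGI (pvEi preds el n m) j = pvGI (pvEi preds el n k) j := by
  intro k
  induction k with
  | zero => intro j hj; simp [pvSiter] at hj
  | succ k ih =>
    intro j hj m hm
    obtain ⟨⟨hj0, hjn⟩, hall⟩ := (pvSiter_mem_succ preds n k j).mp hj
    obtain ⟨m', rfl⟩ : ∃ m', m = m' + 1 := ⟨m - 1, by omega⟩
    rw [pvEi_succ_get preds el n m' j hj0 hjn, pvEi_succ_get preds el n k j hj0 hjn]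
    unfold pvRec
    apply PySem.List.foldl_congr_mem'
    intro p hp b
    rw [ih p (hall p hp) m' (by omega)]

lemma pvE_rec (preds : List (Int × List Int)) (el : List (Int × Int × Int)) (n : Int)
    (j : Int) (hj : j ∈ pvSiter preds n n.toNat) :
    pvGI (pvE preds el n) j = pvRec preds el (pvE preds el n) j := by
  obtain ⟨hj0, hjn⟩ := pvSiter_bound preds n _ j hj
  obtain ⟨t, ht⟩ : ∃ t, n.toNat = t + 1 := ⟨n.toNat - 1, by omega⟩
  have hstable := pvEi_stable preds el n n.toNat j hj (n.toNat + 1) (by omega)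
  unfold pvE
  rw [ht] at hstable ⊢ hj
  rw [pvEi_succ_get preds el n (t+1) j hj0 hjn] at hstable
  exact hstable.symm

lemma pvRec_nonneg (preds : List (Int × List Int)) (el : List (Int × Int × Int))
    (V : List Int) (j : Int) : 0 ≤ pvRec preds el V j :=
  pvFoldlMax_ge_init _ _ 0

lemma pvE_nonneg (preds : List (Int × List Int)) (el : List (Int × Int × Int)) (n : Int)
    (j : Int) (hj : j ∈ pvSiter preds n n.toNat) : 0 ≤ pvGI (pvE preds el n) j := by
  rw [pvE_rec preds el n j hj]
  exact pvRec_nonneg preds el _ j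

-- ===== A-side: Kahn's loop computes the recurrence's solution =====

def pvPartf (preds : List (Int × List Int)) (el : List (Int × Int × Int)) (bt : List Int)
    (P : List Int) (j : Int) : Int :=
  ((pvDictGet preds j).filter (fun p => decide (p ∈ P))).foldl
    (fun b p => max b (pvGI bt p + pvLatGet el p j)) 0

lemma pvPartf_full (preds : List (Int × List Int)) (el : List (Int × Int × Int)) (bt : List Int)
    (P : List Int) (j : Int) (hsub : ∀ p ∈ pvDictGet preds j, p ∈ P) :
    pvPartf preds el bt P j = pvRec preds el bt j := by
  unfold pvPartf pvRec
  rw [List.filter_eq_self.mpr (fun a ha => by simpa using hsub a ha)]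

lemma pvAll_in (preds : List (Int × List Int)) (n : Int) (P : List Int)
    (hSn : ∀ j : Int, 0 ≤ j → j < n → j ∈ pvSiter preds n n.toNat)
    (hp : ∀ j : Int, 0 ≤ j → j < n → ∀ p ∈ pvDictGet preds j, 0 ≤ p ∧ p < n)
    (hclosed : ∀ j : Int, 0 ≤ j → j < n → (∀ p ∈ pvDictGet preds j, p ∈ P) → j ∈ P) :
    ∀ j : Int, 0 ≤ j → j < n → j ∈ P := by
  intro j hj0 hjn
  refine pvS_induct preds n (fun j => 0 ≤ j → j < n → j ∈ P) ?_ n.toNat j (hSn j hj0 hjn) hj0 hjn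
  intro j hq hj0' hjn'
  exact hclosed j hj0' hjn'
    (fun p hp' => hq p hp' (hp j hj0' hjn' p hp').1 (hp j hj0' hjn' p hp').2)

lemma pvInner_spec (el : List (Int × Int × Int)) (n : Int) (i : Int) (hi0 : 0 ≤ i) :
    ∀ (L : List Int), (∀ x ∈ L, (0 ≤ x ∧ x < n) ∧ x ≠ i) →
    ∀ (e d r : List Int), e.length = n.toNat → d.length = n.toNat →
    (∀ j ∈ L, (L.count j : Int) ≤ pvGI d j) →
    ∃ t : List Int,
      (ceInner el i L (e, d, r)).1.length = n.toNat ∧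
      (ceInner el i L (e, d, r)).2.1.length = n.toNat ∧
      (ceInner el i L (e, d, r)).2.2 = r ++ t ∧
      t.Nodup ∧
      (∀ j : Int, j ∈ t ↔ j ∈ L ∧ pvGI d j = (L.count j : Int)) ∧
      (∀ j : Int, 0 ≤ j →
        pvGI (ceInner el i L (e, d, r)).1 j
          = if j ∈ L then max (pvGI e j) (pvGI e i + pvLatGet el i j) else pvGI e j) ∧
      (∀ j : Int, 0 ≤ j →
        pvGI (ceInner el i L (e, d, r)).2.1 j = pvGI d j - (L.count j : Int)) := by
  intro L
  induction L with
  | nil =>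
    intro _ e d r he hd _
    exact ⟨[], he, hd, by simp [ceInner], by simp, by simp,
      fun j _ => by simp [ceInner], fun j _ => by simp [ceInner]⟩
  | cons s T ih =>
    intro hL e d r he hd hcnt
    obtain ⟨⟨hs0, hsn⟩, hsi⟩ := hL s List.mem_cons_self
    set v := pvGI e i + pvLatGet el i s with hv
    set e1 := PySem.List.pySetD e s (max (pvGI e s) v) with he1
    set d1 := PySem.List.pySetD d s (pvGI d s - 1) with hd1
    set r1 := if pvGI d1 s = 0 then r ++ [s] else r with hr1
    have hstep : ceInner el i (s :: T) (e, d, r) = ceInner el i T (e1, d1, r1) := rfl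
    have hlene1 : e1.length = n.toNat := by rw [he1, PySem.List.length_pySetD]; exact he
    have hlend1 : d1.length = n.toNat := by rw [hd1, PySem.List.length_pySetD]; exact hd
    have hsl_e : s < (e.length : Int) := by omega
    have hsl_d : s < (d.length : Int) := by omega
    have hGe1 : ∀ j : Int, 0 ≤ j → pvGI e1 j = if j = s then max (pvGI e s) v else pvGI e j :=
      fun j hj => pvGI_set e s j _ hs0 hsl_e hj
    have hGd1 : ∀ j : Int, 0 ≤ j → pvGI d1 j = if j = s then pvGI d s - 1 else pvGI d j :=
      fun j hj => pvGI_set d s j _ hs0 hsl_d hj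
    have hGe1i : pvGI e1 i = pvGI e i := by
      rw [hGe1 i hi0, if_neg (fun h => hsi h.symm)]
    have hGd1s : pvGI d1 s = pvGI d s - 1 := by rw [hGd1 s hs0, if_pos rfl]
    have hcnthead : (((s :: T).count s : Nat) : Int) ≤ pvGI d s := hcnt s List.mem_cons_self
    have hLT : ∀ x ∈ T, (0 ≤ x ∧ x < n) ∧ x ≠ i := fun x hx => hL x (List.mem_cons_of_mem _ hx)
    have hcntT : ∀ j ∈ T, (T.count j : Int) ≤ pvGI d1 j := by
      intro j hj
      by_cases hjs : j = s
      · subst hjs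
        rw [hGd1s]
        have h2 := hcnthead
        rw [List.count_cons_self] at h2
        push_cast at h2 ⊢
        omega
      · rw [hGd1 j (by have := hLT j hj; omega), if_neg hjs]
        have h2 := hcnt j (List.mem_cons_of_mem _ hj)
        have hcc : (s :: T).count j = T.count j := by
          have hsj : ¬ s = j := fun h => hjs h.symm
          rw [List.count_cons]; simp [hjs, hsj]
        rw [hcc] at h2
        exact h2
    obtain ⟨t', h1, h2, h3, h4, h5, h6, h7⟩ := ih hLT e1 d1 r1 hlene1 hlend1 hcntT
    refine ⟨(if pvGI d s = 1 then [s] else []) ++ t', ?_, ?_, ?_, ?_, ?_, ?_, ?_⟩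
    · rw [hstep]; exact h1
    · rw [hstep]; exact h2
    · rw [hstep, h3, hr1, hGd1s]
      by_cases hds : pvGI d s = 1
      · rw [if_pos (by omega), if_pos hds, List.append_assoc]
      · rw [if_neg (by omega), if_neg hds, List.nil_append]
    · by_cases hds : pvGI d s = 1
      · rw [if_pos hds, List.singleton_append]
        refine List.nodup_cons.mpr ⟨?_, h4⟩
        intro hst'
        obtain ⟨hsT, hEq⟩ := (h5 s).mp hst'
        rw [hGd1s, hds] at hEq
        have : 0 < T.count s := List.count_pos_iff.mpr hsT
        omega
      · rw [if_neg hds, List.nil_append]; exact h4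
    · intro j
      by_cases hjs : j = s
      · subst hjs
        rw [List.count_cons_self]
        by_cases hsT : j ∈ T
        · have hTpos : 0 < T.count j := List.count_pos_iff.mpr hsT
          have hge : (T.count j : Int) + 1 ≤ pvGI d j := by
            have h2 := hcnthead
            rw [List.count_cons_self] at h2
            push_cast at h2
            omega
          rw [if_neg (by omega), List.nil_append, h5 j, hGd1s]
          constructor
          · rintro ⟨_, hEq⟩
            refine ⟨List.mem_cons_self, ?_⟩
            push_cast
            omega
          · rintro ⟨_, hEq⟩
            refine ⟨hsT, ?_⟩
            push_cast at hEq ⊢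
            omega
        · have hT0 : T.count j = 0 := List.count_eq_zero.mpr hsT
          constructor
          · intro hmem
            rcases List.mem_append.mp hmem with hm | hm
            · by_cases hds : pvGI d j = 1
              · refine ⟨List.mem_cons_self, ?_⟩
                rw [hds, hT0]
                norm_num
              · rw [if_neg hds] at hm
                simp at hm
            · obtain ⟨hc, _⟩ := (h5 j).mp hm
              exact absurd hc hsT
          · rintro ⟨_, hEq⟩
            have hds : pvGI d j = 1 := by
              rw [hT0] at hEq
              push_cast at hEq
              omega
            apply List.mem_append.mpr
            left
            rw [if_pos hds]
            exact List.mem_cons_self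
      · have hcc : (s :: T).count j = T.count j := by
          have hsj : ¬ s = j := fun h => hjs h.symm
          rw [List.count_cons]; simp [hjs, hsj]
        rw [hcc]
        have hitem : j ∈ (if pvGI d s = 1 then [s] else []) ++ t' ↔ j ∈ t' := by
          constructor
          · intro hmem
            rcases List.mem_append.mp hmem with hm | hm
            · by_cases hds : pvGI d s = 1
              · rw [if_pos hds] at hm
                simp at hm
                exact absurd hm hjs
              · rw [if_neg hds] at hm
                simp at hm
            · exact hm
          · intro hm
            exact List.mem_append.mpr (Or.inr hm)
        rw [hitem, h5 j]
        by_cases hjT : j ∈ T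
        · have hj0 : 0 ≤ j := by have := hLT j hjT; omega
          rw [hGd1 j hj0, if_neg hjs]
          constructor
          · rintro ⟨_, hEq⟩
            exact ⟨List.mem_cons_of_mem _ hjT, hEq⟩
          · rintro ⟨_, hEq⟩
            exact ⟨hjT, hEq⟩
        · constructor
          · rintro ⟨hc, _⟩
            exact absurd hc hjT
          · rintro ⟨hc, _⟩
            rcases List.mem_cons.mp hc with hh | hh
            · exact absurd hh hjs
            · exact absurd hh hjT
    · intro j hj0
      rw [hstep, h6 j hj0, hGe1i]
      by_cases hjs : j = s
      · subst hjs
        rw [hGe1 j hj0, if_pos rfl]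
        rw [if_pos (List.mem_cons_self)]
        by_cases hsT : j ∈ T
        · rw [if_pos hsT, hv, max_assoc, max_self]
        · rw [if_neg hsT, hv]
      · have hmemc : (j ∈ s :: T) ↔ (j ∈ T) := by
          simp [List.mem_cons, hjs]
        rw [hGe1 j hj0, if_neg hjs]
        simp only [hmemc]
    · intro j hj0
      rw [hstep, h7 j hj0]
      by_cases hjs : j = s
      · subst hjs
        rw [hGd1s, List.count_cons_self]
        push_cast
        omega
      · have hcc : (s :: T).count j = T.count j := by
          have hsj : ¬ s = j := fun h => hjs h.symm
          rw [List.count_cons]; simp [hjs, hsj]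
        rw [hGd1 j hj0, if_neg hjs, hcc]

lemma pvLoop_final (preds : List (Int × List Int)) (el : List (Int × Int × Int)) (n : Int)
    (V : List Int) (hVlen : V.length = n.toNat)
    (hp : ∀ j : Int, 0 ≤ j → j < n → ∀ p ∈ pvDictGet preds j, 0 ≤ p ∧ p < n)
    (hVrec : ∀ j : Int, 0 ≤ j → j < n → pvGI V j = pvRec preds el V j)
    (P e : List Int)
    (he : e.length = n.toNat)
    (hall : ∀ j : Int, 0 ≤ j → j < n → j ∈ P)
    (hiv : ∀ j : Int, 0 ≤ j → j < n → pvGI e j = pvPartf preds el V P j) :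
    e = V := by
  apply pvExtEq e V n he hVlen
  intro j hj0 hjn
  rw [hiv j hj0 hjn,
    pvPartf_full _ _ _ _ _ (fun p hpm => hall p (hp j hj0 hjn p hpm).1 (hp j hj0 hjn p hpm).2),
    ← hVrec j hj0 hjn]

lemma pvLoop_eq (preds succs : List (Int × List Int)) (el : List (Int × Int × Int)) (n : Int)
    (V : List Int) (hVlen : V.length = n.toNat)
    (hVrec : ∀ j : Int, 0 ≤ j → j < n → pvGI V j = pvRec preds el V j)
    (hSn : ∀ j : Int, 0 ≤ j → j < n → j ∈ pvSiter preds n n.toNat)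
    (hp : ∀ j : Int, 0 ≤ j → j < n → ∀ p ∈ pvDictGet preds j, 0 ≤ p ∧ p < n)
    (hs : ∀ j : Int, 0 ≤ j → j < n → ∀ x ∈ pvDictGet succs j, (0 ≤ x ∧ x < n) ∧ x ≠ j)
    (hc : ∀ i j : Int, 0 ≤ i → i < n → 0 ≤ j → j < n →
      (pvDictGet succs i).count j = (pvDictGet preds j).count i) :
    ∀ (fuel : Nat) (P e indeg ready : List Int),
      fuel + P.length = n.toNat →
      e.length = n.toNat → indeg.length = n.toNat →
      (P ++ ready).Nodup →
      (∀ x ∈ P ++ ready, 0 ≤ x ∧ x < n) →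
      (∀ j : Int, 0 ≤ j → j < n →
        pvGI indeg j = ((pvDictGet preds j).countP (fun p => decide (p ∉ P)) : Int)) →
      (∀ j : Int, 0 ≤ j → j < n →
        ((j ∈ P ∨ j ∈ ready) ↔ ∀ p ∈ pvDictGet preds j, p ∈ P)) →
      (∀ j : Int, 0 ≤ j → j < n →
        pvGI e j = pvPartf preds el V P j) →
      ceLoop succs el fuel e indeg ready = V := by
  intro fuel
  induction fuel with
  | zero =>
    intro P e indeg ready hfuel he hind hnd hbd hii hiii hiv
    cases ready with
    | nil =>
      show e = _
      refine pvLoop_final preds el n V hVlen hp hVrec P e he ?_ hiv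
      apply pvAll_in preds n P hSn hp
      intro j hj0 hjn hsub
      rcases (hiii j hj0 hjn).mpr hsub with h | h
      · exact h
      · simp at h
    | cons a as =>
      exfalso
      have hlen := pvNodup_length_le (P ++ a :: as) n hnd hbd
      rw [List.length_append, List.length_cons] at hlen
      omega
  | succ f ih =>
    intro P e indeg ready hfuel he hind hnd hbd hii hiii hiv
    cases ready with
    | nil =>
      show e = _
      refine pvLoop_final preds el n V hVlen hp hVrec P e he ?_ hiv
      apply pvAll_in preds n P hSn hp
      intro j hj0 hjn hsub
      rcases (hiii j hj0 hjn).mpr hsub with h | h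
      · exact h
      · simp at h
    | cons i rest =>
      obtain ⟨hi0, hin⟩ := hbd i (List.mem_append.mpr (Or.inr List.mem_cons_self))
      set L := pvDictGet succs i with hLdef
      have hLb : ∀ x ∈ L, (0 ≤ x ∧ x < n) ∧ x ≠ i := hs i hi0 hin
      have hdisj : P.Disjoint (i :: rest) := List.disjoint_of_nodup_append hnd
      have hiP : i ∉ P := fun hm => hdisj hm List.mem_cons_self
      have hipreds : ∀ p ∈ pvDictGet preds i, p ∈ P :=
        (hiii i hi0 hin).mp (Or.inr List.mem_cons_self)
      have hei : pvGI e i = pvGI V i := by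
        rw [hiv i hi0 hin, pvPartf_full _ _ _ _ _ hipreds, ← hVrec i hi0 hin]
      have hcntL : ∀ j ∈ L, (L.count j : Int) ≤ pvGI indeg j := by
        intro j hj
        obtain ⟨⟨hj0, hjn'⟩, hji⟩ := hLb j hj
        rw [hii j hj0 hjn', hLdef, hc i j hi0 hin hj0 hjn']
        exact_mod_cast Nat.cast_le.mpr (pvCount_le_countP _ _ _ hiP)
      obtain ⟨t, hI1, hI2, hI3, hI4, hI5, hI6, hI7⟩ :=
        pvInner_spec el n i hi0 L hLb e indeg rest he hind hcntL
      have hloopstep : ceLoop succs el (f+1) e indeg (i :: rest)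
          = ceLoop succs el f (ceInner el i L (e, indeg, rest)).1
              (ceInner el i L (e, indeg, rest)).2.1 (ceInner el i L (e, indeg, rest)).2.2 := rfl
      rw [hloopstep, hI3]
      -- facts about members of t
      have htL : ∀ j ∈ t, j ∈ L ∧ pvGI indeg j = (L.count j : Int) := fun j hj => (hI5 j).mp hj
      have htP : ∀ j ∈ t, j ∉ P := by
        intro j hj hjP
        obtain ⟨hjL, hjEq⟩ := htL j hj
        obtain ⟨⟨hj0, hjn'⟩, hji⟩ := hLb j hjL
        have hsubP : ∀ p ∈ pvDictGet preds j, p ∈ P := (hiii j hj0 hjn').mp (Or.inl hjP)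
        have hz : (pvDictGet preds j).countP (fun p => decide (p ∉ P)) = 0 :=
          List.countP_eq_zero.mpr (fun a ha => by simpa using hsubP a ha)
        rw [hii j hj0 hjn', hz] at hjEq
        have : 0 < L.count j := List.count_pos_iff.mpr hjL
        omega
      have htRest : ∀ j ∈ t, j ∉ (i :: rest) := by
        intro j hj hjr
        obtain ⟨hjL, hjEq⟩ := htL j hj
        obtain ⟨⟨hj0, hjn'⟩, hji⟩ := hLb j hjL
        have hsubP : ∀ p ∈ pvDictGet preds j, p ∈ P := (hiii j hj0 hjn').mp (Or.inr hjr)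
        have hz : (pvDictGet preds j).countP (fun p => decide (p ∉ P)) = 0 :=
          List.countP_eq_zero.mpr (fun a ha => by simpa using hsubP a ha)
        rw [hii j hj0 hjn', hz] at hjEq
        have : 0 < L.count j := List.count_pos_iff.mpr hjL
        omega
      apply ih (P ++ [i]) _ _ (rest ++ t)
      · simp only [List.length_append, List.length_singleton]
        omega
      · exact hI1
      · exact hI2
      · -- Nodup
        have heq : (P ++ [i]) ++ (rest ++ t) = (P ++ i :: rest) ++ t := by
          simp
        rw [heq]
        refine List.Nodup.append hnd hI4 ?_
        intro a haPR haT
        rcases List.mem_append.mp haPR with h | h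
        · exact htP a haT h
        · exact htRest a haT h
      · intro x hx
        rcases List.mem_append.mp hx with h | h
        · rcases List.mem_append.mp h with h' | h'
          · exact hbd x (List.mem_append.mpr (Or.inl h'))
          · have : x = i := by simpa using h'
            subst this
            exact ⟨hi0, hin⟩
        · rcases List.mem_append.mp h with h' | h'
          · exact hbd x (List.mem_append.mpr (Or.inr (List.mem_cons_of_mem _ h')))
          · have := hLb x (htL x h').1
            constructor <;> omega
      · -- invariant (ii)
        intro j hj0 hjn'
        rw [hI7 j hj0, hii j hj0 hjn', hLdef, hc i j hi0 hin hj0 hjn']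
        have hsplit := pvCountP_split (pvDictGet preds j) P i hiP
        have hle := pvCount_le_countP (pvDictGet preds j) P i hiP
        push_cast
        omega
      · -- invariant (iii)
        intro j hj0 hjn'
        have hcnteq : L.count j = (pvDictGet preds j).count i := hc i j hi0 hin hj0 hjn'
        constructor
        · intro hmem
          rcases hmem with h | h
          · rcases List.mem_append.mp h with h' | h'
            · exact fun p hp' => List.mem_append.mpr (Or.inl ((hiii j hj0 hjn').mp (Or.inl h') p hp'))
            · have : j = i := by simpa using h'
              subst this
              exact fun p hp' => List.mem_append.mpr (Or.inl (hipreds p hp'))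
          · rcases List.mem_append.mp h with h' | h'
            · exact fun p hp' => List.mem_append.mpr
                (Or.inl ((hiii j hj0 hjn').mp (Or.inr (List.mem_cons_of_mem _ h')) p hp'))
            · -- j ∈ t
              obtain ⟨hjL, hjEq⟩ := htL j h'
              rw [hii j hj0 hjn'] at hjEq
              have hsplit := pvCountP_split (pvDictGet preds j) P i hiP
              have hz : (pvDictGet preds j).countP (fun p => decide (p ∉ P ++ [i])) = 0 := by
                rw [hcnteq] at hjEq
                omega
              intro p hp'
              have hnot := List.countP_eq_zero.mp hz p hp'
              simp only [decide_eq_true_eq, not_not] at hnot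
              exact hnot
        · intro hsub
          by_cases hall : ∀ p ∈ pvDictGet preds j, p ∈ P
          · rcases (hiii j hj0 hjn').mpr hall with h | h
            · exact Or.inl (List.mem_append.mpr (Or.inl h))
            · rcases List.mem_cons.mp h with h' | h'
              · exact Or.inl (List.mem_append.mpr (Or.inr (by simp [h'])))
              · exact Or.inr (List.mem_append.mpr (Or.inl h'))
          · push_neg at hall
            obtain ⟨p0, hp0mem, hp0P⟩ := hall
            have hp0i : p0 = i := by
              rcases List.mem_append.mp (hsub p0 hp0mem) with h | h
              · exact absurd h hp0P
              · simpa using h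
            subst hp0i
            have hz : (pvDictGet preds j).countP (fun p => decide (p ∉ P ++ [p0])) = 0 :=
              List.countP_eq_zero.mpr (fun a ha => by
                simp only [decide_eq_true_eq, not_not]
                exact hsub a ha)
            have hsplit := pvCountP_split (pvDictGet preds j) P p0 hiP
            have hpos : 0 < (pvDictGet preds j).count p0 := List.count_pos_iff.mpr hp0mem
            have hjt : j ∈ t := by
              apply (hI5 j).mpr
              constructor
              · apply List.count_pos_iff.mp
                rw [hcnteq]
                omega
              · rw [hii j hj0 hjn', hcnteq]
                push_cast
                omega
            exact Or.inr (List.mem_append.mpr (Or.inr hjt))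
      · -- invariant (iv)
        intro j hj0 hjn'
        rw [hI6 j hj0]
        have hkey := pvFilter_insert_foldl (fun p => pvGI V p + pvLatGet el p j)
          (pvDictGet preds j) P i hiP 0
        have hcnteq : L.count j = (pvDictGet preds j).count i := hc i j hi0 hin hj0 hjn'
        have hmemiff : (j ∈ L) ↔ (i ∈ pvDictGet preds j) := by
          rw [← List.count_pos_iff, ← List.count_pos_iff, hcnteq]
        simp only [pvPartf] at hkey ⊢
        rw [hkey]
        by_cases hjL : j ∈ L
        · rw [if_pos (hmemiff.mp hjL), if_pos hjL, hiv j hj0 hjn', hei]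
          simp only [pvPartf]
        · rw [if_neg (fun hm => hjL (hmemiff.mpr hm)), if_neg hjL, hiv j hj0 hjn']
          simp only [pvPartf]

-- ===== B-side: relaxation to a fixpoint computes the recurrence's solution =====

lemma bfNode_cons (el : List (Int × Int × Int)) (j p : Int) (rest : List Int)
    (st : List Int × Bool) :
    bfNode el j (p :: rest) st =
      bfNode el j rest
        (if pvGI st.1 j < pvGI st.1 p + pvLatGet el p j
         then (PySem.List.pySetD st.1 j (pvGI st.1 p + pvLatGet el p j), true) else st) := by
  cases st
  rfl

lemma bfNode_spec (el : List (Int × Int × Int)) (n j : Int) (hj0 : 0 ≤ j) (hjn : j < n) :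
    ∀ (ps : List Int), j ∉ ps → (∀ p ∈ ps, 0 ≤ p) → ∀ (e : List Int) (flag : Bool), e.length = n.toNat →
    (bfNode el j ps (e, flag)).1.length = n.toNat ∧
    (∀ i : Int, 0 ≤ i → i ≠ j → pvGI (bfNode el j ps (e, flag)).1 i = pvGI e i) ∧
    pvGI (bfNode el j ps (e, flag)).1 j
      = ps.foldl (fun b p => max b (pvGI e p + pvLatGet el p j)) (pvGI e j) ∧
    ((bfNode el j ps (e, flag)).2 = false →
      flag = false ∧ (bfNode el j ps (e, flag)).1 = e ∧
      ∀ p ∈ ps, pvGI e p + pvLatGet el p j ≤ pvGI e j) := by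
  intro ps
  induction ps with
  | nil =>
    intro _ _ e flag he
    exact ⟨he, fun i _ _ => rfl, rfl, fun h => ⟨h, rfl, by simp⟩⟩
  | cons p rest ih =>
    intro hjps hps e flag he
    have hps' : ∀ q ∈ rest, 0 ≤ q := fun q hq => hps q (List.mem_cons_of_mem _ hq)
    have hpj : p ≠ j := fun h => hjps (h ▸ List.mem_cons_self)
    have hrest : j ∉ rest := fun h => hjps (List.mem_cons_of_mem _ h)
    have hjl : j < (e.length : Int) := by omega
    by_cases hlt : pvGI e j < pvGI e p + pvLatGet el p j
    · have hstep : bfNode el j (p :: rest) (e, flag)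
          = bfNode el j rest (PySem.List.pySetD e j (pvGI e p + pvLatGet el p j), true) := by
        rw [bfNode_cons, if_pos hlt]
      set t := pvGI e p + pvLatGet el p j with ht
      set e1 := PySem.List.pySetD e j t with he1
      have hlene1 : e1.length = n.toNat := by rw [he1, PySem.List.length_pySetD]; exact he
      have hGe1 : ∀ i : Int, 0 ≤ i → pvGI e1 i = if i = j then t else pvGI e i :=
        fun i hi => pvGI_set e j i t hj0 hjl hi
      obtain ⟨i1, i2, i3, i4⟩ := ih hrest hps' e1 true hlene1
      rw [hstep]
      refine ⟨i1, ?_, ?_, ?_⟩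
      · intro i hi hij
        rw [i2 i hi hij, hGe1 i hi, if_neg hij]
      · rw [i3, List.foldl_cons]
        have hinit : pvGI e1 j = max (pvGI e j) t := by
          rw [hGe1 j hj0, if_pos rfl, max_eq_right hlt.le]
        rw [hinit]
        apply PySem.List.foldl_congr_mem'
        intro q hq b
        have hqj : q ≠ j := fun h => hrest (h ▸ hq)
        rw [hGe1 q (hps' q hq), if_neg hqj]
      · intro hfl
        obtain ⟨hf, _, _⟩ := i4 hfl
        simp at hf
    · have hstep : bfNode el j (p :: rest) (e, flag) = bfNode el j rest (e, flag) := by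
        rw [bfNode_cons, if_neg hlt]
      obtain ⟨i1, i2, i3, i4⟩ := ih hrest hps' e flag he
      rw [hstep]
      refine ⟨i1, i2, ?_, ?_⟩
      · rw [i3, List.foldl_cons, max_eq_left (not_lt.mp hlt)]
      · intro hfl
        obtain ⟨hf, heq, hcond⟩ := i4 hfl
        refine ⟨hf, heq, ?_⟩
        intro q hq
        rcases List.mem_cons.mp hq with h | h
        · subst h; exact not_lt.mp hlt
        · exact hcond q h

lemma bfRoundAux_spec (preds : List (Int × List Int)) (el : List (Int × Int × Int)) (n : Int)
    (E : List Int)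
    (hp : ∀ j : Int, 0 ≤ j → j < n → ∀ p ∈ pvDictGet preds j, 0 ≤ p ∧ p < n)
    (hnsl : ∀ j : Int, 0 ≤ j → j < n → j ∉ pvDictGet preds j)
    (hErec : ∀ j : Int, 0 ≤ j → j < n → pvGI E j = pvRec preds el E j) :
    ∀ (L : List Int), L.Nodup → (∀ j ∈ L, 0 ≤ j ∧ j < n) →
    ∀ (e : List Int) (flag : Bool), e.length = n.toNat →
    (∀ i : Int, 0 ≤ i → i < n → 0 ≤ pvGI e i) →
    (∀ i : Int, 0 ≤ i → i < n → pvGI e i ≤ pvGI E i) →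
    (L.foldl (fun st j => bfNode el j (pvDictGet preds j) st) (e, flag)).1.length = n.toNat ∧
    (∀ i : Int, 0 ≤ i →
      pvGI e i ≤ pvGI (L.foldl (fun st j => bfNode el j (pvDictGet preds j) st) (e, flag)).1 i) ∧
    (∀ i : Int, 0 ≤ i → i < n →
      pvGI (L.foldl (fun st j => bfNode el j (pvDictGet preds j) st) (e, flag)).1 i ≤ pvGI E i) ∧
    (∀ k : Nat, (∀ p : Int, 0 ≤ p → p < n → p ∈ pvSiter preds n k → pvGI e p = pvGI E p) →
      ∀ j ∈ L, j ∈ pvSiter preds n (k+1) →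
        pvGI (L.foldl (fun st j => bfNode el j (pvDictGet preds j) st) (e, flag)).1 j = pvGI E j) ∧
    ((L.foldl (fun st j => bfNode el j (pvDictGet preds j) st) (e, flag)).2 = false →
      flag = false ∧ (L.foldl (fun st j => bfNode el j (pvDictGet preds j) st) (e, flag)).1 = e ∧
      ∀ j ∈ L, ∀ p ∈ pvDictGet preds j, pvGI e p + pvLatGet el p j ≤ pvGI e j) := by
  intro L
  induction L with
  | nil =>
    intro _ _ e flag he _ hcap
    exact ⟨he, fun i _ => le_refl _, fun i hi0 hin => hcap i hi0 hin,
      fun k _ j hj => by simp at hj, fun h => ⟨h, rfl, by simp⟩⟩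
  | cons j0 rest ih =>
    intro hnd hL e flag he h0 hcap
    obtain ⟨hj00, hj0n⟩ := hL j0 List.mem_cons_self
    have hndr : rest.Nodup := (List.nodup_cons.mp hnd).2
    have hj0r : j0 ∉ rest := (List.nodup_cons.mp hnd).1
    have hLr : ∀ j ∈ rest, 0 ≤ j ∧ j < n := fun j hj => hL j (List.mem_cons_of_mem _ hj)
    set ps := pvDictGet preds j0 with hpsdef
    have hpsb : ∀ p ∈ ps, 0 ≤ p ∧ p < n := hp j0 hj00 hj0n
    obtain ⟨n1, n2, n3, n4⟩ :=
      bfNode_spec el n j0 hj00 hj0n ps (hnsl j0 hj00 hj0n) (fun p hps => (hpsb p hps).1) e flag he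
    set st1 := bfNode el j0 ps (e, flag) with hst1
    have hmono1 : ∀ i : Int, 0 ≤ i → pvGI e i ≤ pvGI st1.1 i := by
      intro i hi
      by_cases hij : i = j0
      · subst hij
        rw [n3]
        exact pvFoldlMax_ge_init _ _ _
      · rw [n2 i hi hij]
    have hcap1 : ∀ i : Int, 0 ≤ i → i < n → pvGI st1.1 i ≤ pvGI E i := by
      intro i hi0 hin
      by_cases hij : i = j0
      · subst hij
        rw [n3]
        apply pvFoldlMax_le
        · exact hcap i hi0 hin
        · intro p hps
          calc pvGI e p + pvLatGet el p i
              ≤ pvGI E p + pvLatGet el p i := by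
                have hb := hpsb p hps
                have := hcap p hb.1 hb.2
                omega
            _ ≤ pvRec preds el E i := pvFoldlMax_mem_le _ _ 0 p hps
            _ = pvGI E i := (hErec i hi0 hin).symm
      · rw [n2 i hi0 hij]
        exact hcap i hi0 hin
    have h01 : ∀ i : Int, 0 ≤ i → i < n → 0 ≤ pvGI st1.1 i :=
      fun i hi0 hin => le_trans (h0 i hi0 hin) (hmono1 i hi0)
    have hfold : (j0 :: rest).foldl (fun st j => bfNode el j (pvDictGet preds j) st) (e, flag)
        = rest.foldl (fun st j => bfNode el j (pvDictGet preds j) st) (st1.1, st1.2) := by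
      rw [List.foldl_cons]
    obtain ⟨r1, r2, r3, r4, r5⟩ := ih hndr hLr st1.1 st1.2 n1 h01 hcap1
    rw [hfold]
    refine ⟨r1, ?_, r3, ?_, ?_⟩
    · intro i hi
      exact le_trans (hmono1 i hi) (r2 i hi)
    · -- progress
      intro k hk j hjmem hjS
      rcases List.mem_cons.mp hjmem with hj | hj
      · subst hj
        obtain ⟨_, hpredsS⟩ := (pvSiter_mem_succ preds n k j).mp hjS
        have hst1j : pvGI st1.1 j = pvGI E j := by
          apply le_antisymm (hcap1 j hj00 hj0n)
          rw [n3]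
          have hcg : ps.foldl (fun b p => max b (pvGI e p + pvLatGet el p j)) (0 : Int)
              = ps.foldl (fun b p => max b (pvGI E p + pvLatGet el p j)) (0 : Int) := by
            apply PySem.List.foldl_congr_mem'
            intro p hps b
            have hb := hpsb p hps
            rw [hk p hb.1 hb.2 (hpredsS p hps)]
          calc pvGI E j = pvRec preds el E j := hErec j hj00 hj0n
            _ = ps.foldl (fun b p => max b (pvGI e p + pvLatGet el p j)) (0 : Int) := hcg.symm
            _ ≤ ps.foldl (fun b p => max b (pvGI e p + pvLatGet el p j)) (pvGI e j) :=
                pvFoldlMax_mono_init _ _ _ _ (h0 j hj00 hj0n)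
        apply le_antisymm (r3 j hj00 hj0n)
        rw [← hst1j]
        exact r2 j hj00
      · apply r4 k ?_ j hj hjS
        intro p hp0 hpn hpS
        exact le_antisymm (hcap1 p hp0 hpn) (by rw [← hk p hp0 hpn hpS]; exact hmono1 p hp0)
    · -- stability
      intro hflag
      obtain ⟨hf1, hr1, hcondr⟩ := r5 hflag
      obtain ⟨hf0, hst1e, hcond0⟩ := n4 hf1
      have hst1e1 : st1.1 = e := hst1e
      refine ⟨hf0, by rw [hr1, hst1e1], ?_⟩
      intro j hj p hpj
      rcases List.mem_cons.mp hj with hj' | hj'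
      · subst hj'
        exact hcond0 p hpj
      · have := hcondr j hj' p hpj
        rw [hst1e1] at this
        exact this

lemma bfLoop_eq (preds : List (Int × List Int)) (el : List (Int × Int × Int)) (n : Int)
    (E : List Int) (hElen : E.length = n.toNat)
    (hErec : ∀ j : Int, 0 ≤ j → j < n → pvGI E j = pvRec preds el E j)
    (hSn : ∀ j : Int, 0 ≤ j → j < n → j ∈ pvSiter preds n n.toNat)
    (hp : ∀ j : Int, 0 ≤ j → j < n → ∀ p ∈ pvDictGet preds j, 0 ≤ p ∧ p < n)
    (hnsl : ∀ j : Int, 0 ≤ j → j < n → j ∉ pvDictGet preds j) :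
    ∀ (m : Nat) (e : List Int), e.length = n.toNat →
    (∀ i : Int, 0 ≤ i → i < n → 0 ≤ pvGI e i) →
    (∀ i : Int, 0 ≤ i → i < n → pvGI e i ≤ pvGI E i) →
    (∀ p : Int, 0 ≤ p → p < n → p ∈ pvSiter preds n (n.toNat - m) → pvGI e p = pvGI E p) →
    bfLoop preds el n m e = E := by
  intro m
  induction m with
  | zero =>
    intro e he h0 hcap hdone
    show e = E
    apply pvExtEq e E n he hElen
    intro j hj0 hjn
    exact hdone j hj0 hjn (by simpa using hSn j hj0 hjn)
  | succ m ih =>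
    intro e he h0 hcap hdone
    have hLnd := PySem.List.nodup_pyRange_one (a := 0) (b := n)
    have hLb : ∀ j ∈ PySem.List.pyRange 0 n 1, 0 ≤ j ∧ j < n :=
      fun j hj => PySem.List.mem_pyRange_one.mp hj
    obtain ⟨r1, r2, r3, r4, r5⟩ :=
      bfRoundAux_spec preds el n E hp hnsl hErec (PySem.List.pyRange 0 n 1) hLnd hLb
        e false he h0 hcap
    set r := bfRound preds el n e with hr
    have hrfold : r = (PySem.List.pyRange 0 n 1).foldl
        (fun st j => bfNode el j (pvDictGet preds j) st) (e, false) := rfl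
    rw [← hrfold] at r1 r2 r3 r4 r5
    have hstep : bfLoop preds el n (m+1) e = if r.2 then bfLoop preds el n m r.1 else r.1 := rfl
    rw [hstep]
    by_cases hfl : r.2 = true
    · rw [if_pos hfl]
      apply ih r.1 r1
      · intro i hi0 hin
        exact le_trans (h0 i hi0 hin) (r2 i hi0)
      · exact r3
      · -- progress: the closure index advances by one round
        intro p hp0 hpn hpS
        by_cases hz : n.toNat - m = 0
        · rw [hz] at hpS
          simp [pvSiter] at hpS
        · obtain ⟨k, hk⟩ : ∃ k, n.toNat - m = k + 1 := ⟨n.toNat - (m+1), by omega⟩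
          rw [hk] at hpS
          apply r4 k ?_ p (PySem.List.mem_pyRange_one.mpr ⟨hp0, hpn⟩) hpS
          intro q h1 h2 h3
          exact hdone q h1 h2 (by rw [show n.toNat - (m+1) = k by omega]; exact h3)
    · rw [if_neg hfl]
      obtain ⟨_, hre, hpost⟩ := r5 (by simpa using hfl)
      rw [hre]
      apply pvExtEq e E n he hElen
      have hq : ∀ j : Int, 0 ≤ j → j < n → pvGI e j = pvGI E j := by
        intro j hj0 hjn
        refine pvS_induct preds n (fun j => 0 ≤ j → j < n → pvGI e j = pvGI E j) ?_
          n.toNat j (hSn j hj0 hjn) hj0 hjn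
        intro j hqc hj0' hjn'
        apply le_antisymm (hcap j hj0' hjn')
        calc pvGI E j = pvRec preds el E j := hErec j hj0' hjn'
          _ = (pvDictGet preds j).foldl
                (fun b p => max b (pvGI e p + pvLatGet el p j)) (0 : Int) := by
              unfold pvRec
              apply PySem.List.foldl_congr_mem'
              intro p hp' b
              have hb := hp j hj0' hjn' p hp'
              rw [hqc p hp' hb.1 hb.2]
          _ ≤ pvGI e j := by
              apply pvFoldlMax_le
              · exact h0 j hj0' hjn'
              · exact hpost j (PySem.List.mem_pyRange_one.mpr ⟨hj0', hjn'⟩)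
      exact hq

lemma pvGI_replicate (n : Int) (j : Int) (hj : 0 ≤ j) :
    pvGI (List.replicate n.toNat (0 : Int)) j = 0 := by
  rw [pvGI_eq_getD _ _ hj]
  rcases lt_or_ge j.toNat n.toNat with h | h
  · rw [List.getD_eq_getElem _ _ (by simpa using h)]
    exact List.getElem_replicate _
  · exact List.getD_eq_default _ _ (by simpa using h)

lemma pvAlt_eq_E (preds succs : List (Int × List Int)) (el : List (Int × Int × Int)) (n : Int)
    (hSn : ∀ j : Int, 0 ≤ j → j < n → j ∈ pvSiter preds n n.toNat)
    (hp : ∀ j : Int, 0 ≤ j → j < n → ∀ p ∈ pvDictGet preds j, 0 ≤ p ∧ p < n)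
    (hnsl : ∀ j : Int, 0 ≤ j → j < n → j ∉ pvDictGet preds j) :
    compute_earliest_times_alt preds succs el n = pvE preds el n := by
  show bfLoop preds el n n.toNat (List.replicate n.toNat 0) = pvE preds el n
  apply bfLoop_eq preds el n (pvE preds el n) (pvEi_length preds el n n.toNat)
    (fun j hj0 hjn => pvE_rec preds el n j (hSn j hj0 hjn)) hSn hp hnsl
  · exact List.length_replicate
  · intro i hi0 _
    rw [pvGI_replicate n i hi0]
  · intro i hi0 hin
    rw [pvGI_replicate n i hi0]
    exact pvE_nonneg preds el n i (hSn i hi0 hin)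
  · intro p _ _ hpS
    rw [Nat.sub_self] at hpS
    simp [pvSiter] at hpS

-- ===== VERDICT (by name: the statement is the Claim_ definition above) =====
theorem compute_earliest_times_spec : Claim_equal_compute_earliest_times := by
  unfold Claim_equal_compute_earliest_times
  intro preds succs el n _ hpre
  unfold Spec_compute_earliest_times
  unfold Pre_compute_earliest_times at hpre
  obtain ⟨hpre, -, -, -⟩ := hpre
  simp only [pvPreB, Bool.and_eq_true, List.all_eq_true, decide_eq_true_eq, beq_iff_eq,
    List.any_eq_true] at hpre
  replace hpre := hpre.2
  have hSn : ∀ j : Int, 0 ≤ j → j < n → j ∈ pvSiter preds n n.toNat := by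
    intro j h0 h1
    have h := (hpre j (PySem.List.mem_pyRange_one.mpr ⟨h0, h1⟩)).2
    simpa using h
  have hp : ∀ j : Int, 0 ≤ j → j < n → ∀ p ∈ pvDictGet preds j, 0 ≤ p ∧ p < n :=
    fun j h0 h1 => (hpre j (PySem.List.mem_pyRange_one.mpr ⟨h0, h1⟩)).1.1.1.2
  have hsx : ∀ j : Int, 0 ≤ j → j < n → ∀ x ∈ pvDictGet succs j, 0 ≤ x ∧ x < n :=
    fun j h0 h1 => (hpre j (PySem.List.mem_pyRange_one.mpr ⟨h0, h1⟩)).1.1.2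
  have hc : ∀ i j : Int, 0 ≤ i → i < n → 0 ≤ j → j < n →
      (pvDictGet succs i).count j = (pvDictGet preds j).count i :=
    fun i j hi0 hi1 hj0 hj1 =>
      (hpre j (PySem.List.mem_pyRange_one.mpr ⟨hj0, hj1⟩)).1.2 i
        (PySem.List.mem_pyRange_one.mpr ⟨hi0, hi1⟩)
  have hnsl : ∀ j : Int, 0 ≤ j → j < n → j ∉ pvDictGet preds j :=
    fun j h0 h1 => pvS_no_self preds n n.toNat j (hSn j h0 h1)
  have hs : ∀ j : Int, 0 ≤ j → j < n → ∀ x ∈ pvDictGet succs j, (0 ≤ x ∧ x < n) ∧ x ≠ j := by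
    intro j h0 h1 x hx
    refine ⟨hsx j h0 h1 x hx, ?_⟩
    intro hxj
    subst hxj
    have hpos : 0 < (pvDictGet succs x).count x := List.count_pos_iff.mpr hx
    rw [hc x x h0 h1 h0 h1] at hpos
    exact hnsl x h0 h1 (List.count_pos_iff.mp hpos)
  have hB := pvAlt_eq_E preds succs el n hSn hp hnsl
  rw [hB]
  have hVlen := pvEi_length preds el n n.toNat
  have hVrec : ∀ j : Int, 0 ≤ j → j < n → pvGI (pvE preds el n) j = pvRec preds el (pvE preds el n) j :=
    fun j h0 h1 => pvE_rec preds el n j (hSn j h0 h1)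
  set e0 := List.replicate n.toNat (0:Int) with he0
  set indeg0 := (PySem.List.pyRange 0 n 1).map (fun i => PySem.List.len (pvDictGet preds i)) with hindeg0
  set ready0 := (PySem.List.pyRange 0 n 1).filter (fun i => PySem.List.pyGetD indeg0 i 0 == 0) with hready0def
  have hA : compute_earliest_times preds succs el n = ceLoop succs el n.toNat e0 indeg0 ready0 := rfl
  rw [hA]
  have hind0 : ∀ j : Int, 0 ≤ j → j < n → pvGI indeg0 j = ((pvDictGet preds j).length : Int) := by
    intro j h0 h1
    show PySem.List.pyGetD _ j 0 = _
    rw [hindeg0, PySem.List.pyGetD_map_pyRange_of_nonneg _ n j 0 h0 h1, PySem.List.len_eq]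
  have hready0 : ∀ j : Int, 0 ≤ j → j < n → (j ∈ ready0 ↔ pvDictGet preds j = []) := by
    intro j h0 h1
    rw [hready0def, List.mem_filter]
    constructor
    · rintro ⟨_, hb⟩
      have hb' : pvGI indeg0 j = 0 := by simpa using hb
      rw [hind0 j h0 h1] at hb'
      have : (pvDictGet preds j).length = 0 := by omega
      exact List.length_eq_zero_iff.mp this
    · intro hnil
      refine ⟨PySem.List.mem_pyRange_one.mpr ⟨h0, h1⟩, ?_⟩
      have : pvGI indeg0 j = 0 := by rw [hind0 j h0 h1, hnil]; simp
      simpa using this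
  apply pvLoop_eq preds succs el n (pvE preds el n) hVlen hVrec hSn hp hs hc n.toNat [] e0 indeg0 ready0
  · simp
  · exact List.length_replicate
  · rw [hindeg0, List.length_map, PySem.List.length_pyRange_one]
    omega
  · show ([] ++ ready0).Nodup
    rw [List.nil_append, hready0def]
    exact (PySem.List.nodup_pyRange_one 0 n).filter _
  · intro x hx
    rw [List.nil_append, hready0def] at hx
    exact PySem.List.mem_pyRange_one.mp (List.mem_of_mem_filter hx)
  · intro j h0 h1
    rw [hind0 j h0 h1]
    congr 1
    exact (List.countP_eq_length.mpr (fun a _ => by simp)).symm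
  · intro j h0 h1
    rw [hready0 j h0 h1]
    simp only [List.not_mem_nil, false_or]
    constructor
    · intro hnil p hpmem
      rw [hnil] at hpmem
      simp at hpmem
    · intro hall
      refine List.eq_nil_iff_forall_not_mem.mpr (fun p hp' => ?_)
      have := hall p hp'
      simp at this
  · intro j h0 h1
    rw [show pvGI e0 j = 0 from pvGI_replicate n j h0]
    simp [pvPartf]
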